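-- pv_equiv track=rewrite | github.com/qsimeon/PSY1401Projects | final_project/common_methods.py | repeat_chunking
-- ===== SOURCE A (Python) =====
-- def find_repeats(seq, length):
--     """
--     Finds repeats of patterns of a fixed length.
--     """
--     i = 0
--     result = []
--     while i < len(seq):
--         if i + 2 * length <= len(seq) and seq[i:i+length] == seq[i+length:i+2*length]:
--             pattern = seq[i:i+length]
--             count = 2
--             j = i + 2 * length
--             while j + length <= len(seq) and seq[j:j+length] == pattern:
--                 count += 1
--                 j += length
--             result.append(f'[{pattern}]{count}')
--             i = j
--
--         else: # move onto the next character
--             result.append(seq[i])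
--             i += 1
--
--     return ''.join(result)
--
-- def repeat_chunking(seq, single_only=False):
--     '''
--     Finds repeating patterns within a sequence recursively.
--     If single_only, only simple single-character repeats.
--     Otherwise, includes multicolor and nested repeats.
--     Note: Shorter pattern lengths are chunked first. Once a character is chunked, that chunk cannot be broken.
--         E.g. GBGBBB = GBG[B]3, not [GB]2[B]2 because the B's at the end are chunked first.
--     '''
--     length = 1 # Initialize pattern length
--     max_len = 1
--
--     # recursively look for repeating patterns of increasing length
--     new_seq = seq
--     while length <= max_len:
--         new_seq = find_repeats(new_seq, length)
--         max_len = 1 if single_only else len(new_seq)//2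
--         length += 1 # increase length and keep going
--
--     code = ''.join(new_seq)
--     code_len = len(code.replace('[', '').replace(']', ''))
--
--     return code_len, code
-- ===== SOURCE B (Python) =====
-- def _chunk_pass(s, length):
--     """One left-to-right pass chunking repeats of a fixed pattern length,
--     using a precomputed shift-match table instead of repeated slice comparisons."""
--     n = len(s)
--     # t[k] = length of the longest stretch with s[k+d] == s[k+d+length] for d < t[k]
--     t = [0] * (n + 1)
--     for k in range(n - length - 1, -1, -1):
--         t[k] = t[k + 1] + 1 if s[k] == s[k + length] else 0
--     out = []
--     i = 0
--     while i < n: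
--         if t[i] >= length:
--             count = t[i] // length + 1
--             out.append('[%s]%d' % (s[i:i + length], count))
--             i += count * length
--         else:
--             out.append(s[i])
--             i += 1
--     return ''.join(out)
--
-- def repeat_chunking(seq, single_only=False):
--     length = 1
--     max_len = 1
--     new_seq = seq
--     while length <= max_len:
--         new_seq = _chunk_pass(new_seq, length)
--         max_len = 1 if single_only else len(new_seq) // 2
--         length += 1
--     code_len = sum(1 for c in new_seq if c != '[' and c != ']')
--     return code_len, new_seq
-- ===== Notes on version B (the rewrite author's own statement) =====
-- stated objective: faster
-- what changed: Each chunking pass precomputes a shift-match table t (t[k] = length of the run with s[k+d]==s[k+d+L]) by one right-to-left sweep, so block equality and the repeat count become O(1) table lookups (count = t[i]//L + 1) instead of A's repeated O(L) slice comparisons and inner counting loop.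
import Mathlib
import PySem

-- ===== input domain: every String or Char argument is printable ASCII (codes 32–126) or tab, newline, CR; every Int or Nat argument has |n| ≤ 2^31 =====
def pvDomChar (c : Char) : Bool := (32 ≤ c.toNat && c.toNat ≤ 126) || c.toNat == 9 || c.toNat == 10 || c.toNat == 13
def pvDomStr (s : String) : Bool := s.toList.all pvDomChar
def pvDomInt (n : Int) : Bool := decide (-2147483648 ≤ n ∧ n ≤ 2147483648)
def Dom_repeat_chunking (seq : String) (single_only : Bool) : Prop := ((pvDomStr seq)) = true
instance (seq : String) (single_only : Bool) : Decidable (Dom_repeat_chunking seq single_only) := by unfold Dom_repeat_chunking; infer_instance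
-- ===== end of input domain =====

-- B replaces A's repeated O(L)-slice comparisons by a precomputed shift-match table
-- (one pass per pattern length), same results; objective: faster (constant/asymptotic per pass).


-- ===== PORT A =====
-- inner while loop of find_repeats: counts further pattern repeats (fuel only makes it total;
-- j grows by length ≥ 1 each step, so fuel len+1 is never exhausted on the calls A makes)
def pvCntA (s : List Char) (L : Nat) (pattern : List Char) : Nat → Nat → Nat → Nat × Nat
  | 0, count, j => (count, j)
  | fuel+1, count, j =>
    if j + L ≤ s.length ∧
       PySem.List.slice s (some (j : Int)) (some ((j : Int) + (L : Int))) = pattern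
    then pvCntA s L pattern fuel (count + 1) (j + L)
    else (count, j)

-- outer while loop of find_repeats (i grows by ≥ 1 each step; fuel len+1 suffices)
def pvFrA (s : List Char) (L : Nat) : Nat → Nat → List (List Char) → List Char
  | 0, _, acc => acc.flatten
  | fuel+1, i, acc =>
    if i < s.length then
      if i + 2 * L ≤ s.length ∧
         PySem.List.slice s (some (i : Int)) (some ((i : Int) + (L : Int))) =
           PySem.List.slice s (some ((i : Int) + (L : Int))) (some ((i : Int) + 2 * (L : Int)))
      then
        let pattern := PySem.List.slice s (some (i : Int)) (some ((i : Int) + (L : Int)))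
        let r := pvCntA s L pattern (s.length + 1) 2 (i + 2 * L)
        pvFrA s L fuel r.2 (acc ++ [['['] ++ pattern ++ [']'] ++ PySem.Int.toChars (r.1 : Int)])
      else pvFrA s L fuel (i + 1) (acc ++ [[PySem.List.pyGetD s (i : Int) default]])
    else acc.flatten

-- the while loop of repeat_chunking; Python terminates but not structurally, so a generous
-- fuel (passed below) makes the port total without changing any computed value
def pvOuterA (so : Bool) : Nat → List Char → Nat → Nat → List Char
  | 0, ns, _, _ => ns
  | fuel+1, ns, length, max_len =>
    if length ≤ max_len then
      let ns' := pvFrA ns length (ns.length + 1) 0 []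
      pvOuterA so fuel ns' (length + 1) (if so then 1 else ns'.length / 2)
    else ns

def repeat_chunking (seq : String) (single_only : Bool) : Int × String :=
  let cs := seq.toList
  let code := pvOuterA single_only (100 * cs.length + 100) cs 1 1
  let stripped := PySem.Chars.replace (PySem.Chars.replace code ['['] []) [']'] []
  ((stripped.length : Int), String.ofList code)

-- ===== PORT B =====
-- shift-match table of Source B: pvT s L k = t[k], the length of the longest stretch with
-- s[k+d] == s[k+d+L] for all d < t[k] (Source B memoises this recurrence in an array)
def pvT (s : List Char) (L : Nat) (k : Nat) : Nat :=
  if h : k + L < s.length ∧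
     PySem.List.pyGetD s (k : Int) default = PySem.List.pyGetD s ((k + L : Nat) : Int) default
  then pvT s L (k + 1) + 1 else 0
termination_by s.length - k
decreasing_by omega

-- scan loop of _chunk_pass (same fuel device as pvFrA)
def pvFrB (s : List Char) (L : Nat) : Nat → Nat → List (List Char) → List Char
  | 0, _, acc => acc.flatten
  | fuel+1, i, acc =>
    if i < s.length then
      if L ≤ pvT s L i then
        let count := pvT s L i / L + 1
        pvFrB s L fuel (i + count * L)
          (acc ++ [['['] ++ PySem.List.slice s (some (i : Int)) (some ((i : Int) + (L : Int))) ++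
                   [']'] ++ PySem.Int.toChars (count : Int)])
      else pvFrB s L fuel (i + 1) (acc ++ [[PySem.List.pyGetD s (i : Int) default]])
    else acc.flatten

def pvOuterB (so : Bool) : Nat → List Char → Nat → Nat → List Char
  | 0, ns, _, _ => ns
  | fuel+1, ns, length, max_len =>
    if length ≤ max_len then
      let ns' := pvFrB ns length (ns.length + 1) 0 []
      pvOuterB so fuel ns' (length + 1) (if so then 1 else ns'.length / 2)
    else ns

def repeat_chunking_alt (seq : String) (single_only : Bool) : Int × String :=
  let cs := seq.toList
  let final := pvOuterB single_only (100 * cs.length + 100) cs 1 1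
  ((List.countP (fun c => !(c == '[') && !(c == ']')) final : Int), String.ofList final)

-- ===== PRECONDITION & SPEC =====
def Spec_repeat_chunking (seq : String) (single_only : Bool) (out : Int × String) : Prop := out = repeat_chunking_alt seq single_only
instance (seq : String) (single_only : Bool) (out : Int × String) : Decidable (Spec_repeat_chunking seq single_only out) := by unfold Spec_repeat_chunking; infer_instance

-- ===== CLAIM (what is proved, stated in full; the proofs are below) =====
def Claim_equal_repeat_chunking : Prop := ∀ (seq : String) (single_only : Bool), Dom_repeat_chunking seq single_only → Spec_repeat_chunking seq single_only (repeat_chunking seq single_only)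

-- ===== LEMMAS AND PROOFS =====

theorem pvT_eq (s : List Char) (L k : Nat) :
    pvT s L k =
      if k + L < s.length ∧ s.getD k default = s.getD (k + L) default
      then pvT s L (k + 1) + 1 else 0 := by
  rw [pvT]
  simp only [PySem.List.pyGetD_natCast, dite_eq_ite]

theorem pvT_le (s : List Char) (L : Nat) : ∀ k, pvT s L k ≤ s.length := by
  have H : ∀ j k, s.length - k ≤ j → pvT s L k ≤ s.length - k := by
    intro j
    induction j with
    | zero =>
      intro k hk
      rw [pvT_eq]
      split
      · omega
      · omega
    | succ j ih =>
      intro k hk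
      rw [pvT_eq]
      split
      · rename_i h
        have := ih (k + 1) (by omega)
        omega
      · omega
  intro k
  have := H s.length k (by omega)
  omega

theorem pvT_ge_iff (s : List Char) (L : Nat) : ∀ (m i : Nat),
    (m ≤ pvT s L i ↔
      (m = 0 ∨ (i + m + L ≤ s.length ∧
        ∀ d < m, s.getD (i + d) default = s.getD (i + d + L) default))) := by
  intro m
  induction m with
  | zero => intro i; simp
  | succ m ih =>
    intro i
    rw [pvT_eq]
    split
    · rename_i h
      constructor
      · intro hle
        have hm : m ≤ pvT s L (i + 1) := by omega
        rcases (ih (i + 1)).mp hm with h0 | ⟨hbd, hmt⟩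
        · subst h0
          refine Or.inr ⟨by omega, ?_⟩
          intro d hd
          have : d = 0 := by omega
          subst this
          simpa using h.2
        · refine Or.inr ⟨by omega, ?_⟩
          intro d hd
          rcases Nat.eq_zero_or_pos d with h0 | hpos
          · subst h0; simpa using h.2
          · have he := hmt (d - 1) (by omega)
            have e1 : i + 1 + (d - 1) = i + d := by omega
            rw [e1] at he
            exact he
      · rintro (h0 | ⟨hbd, hmt⟩)
        · omega
        · have hm : m ≤ pvT s L (i + 1) := by
            apply (ih (i + 1)).mpr
            rcases Nat.eq_zero_or_pos m with h0 | hpos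
            · exact Or.inl h0
            · refine Or.inr ⟨by omega, ?_⟩
              intro d hd
              have he := hmt (d + 1) (by omega)
              have e1 : i + (d + 1) = i + 1 + d := by omega
              rw [e1] at he
              exact he
          omega
    · rename_i h
      rw [not_and_or] at h
      constructor
      · omega
      · rintro (h0 | ⟨hbd, hmt⟩)
        · omega
        · exfalso
          rcases h with hb | hne
          · omega
          · exact hne (by simpa using hmt 0 (by omega))

theorem window_eq_iff (s : List Char) (a b m : Nat)
    (ha : a + m ≤ s.length) (hb : b + m ≤ s.length) :
    ((s.drop a).take m = (s.drop b).take m ↔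
      ∀ d < m, s.getD (a + d) default = s.getD (b + d) default) := by
  have hla : ((s.drop a).take m).length = m := by simp; omega
  have hlb : ((s.drop b).take m).length = m := by simp; omega
  constructor
  · intro hEq d hd
    have h1 : a + d < s.length := by omega
    have h2 : b + d < s.length := by omega
    rw [List.getD_eq_getElem s default h1, List.getD_eq_getElem s default h2]
    have := congrArg (fun l => l[d]?) hEq
    simpa [List.getElem?_take_of_lt, hd, List.getElem?_drop, h1, h2,
      List.getElem?_eq_getElem] using this
  · intro hp
    apply List.ext_getElem (by rw [hla, hlb])
    intro d hd1 hd2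
    rw [hla] at hd1
    have h1 : a + d < s.length := by omega
    have h2 : b + d < s.length := by omega
    have := hp d hd1
    rw [List.getD_eq_getElem s default h1, List.getD_eq_getElem s default h2] at this
    simpa [List.getElem_take, List.getElem_drop] using this

theorem chain_fun (f : Nat → Char) (L : Nat) : ∀ (c : Nat),
    (∀ d < c * L, f d = f (d + L)) → ∀ e < L, f e = f (e + c * L) := by
  intro c
  induction c with
  | zero => intro _ e _; simp
  | succ c ih =>
    intro h e he
    have h1 : f e = f (e + c * L) := ih (fun d hd => h d (by nlinarith)) e he
    have h2 : f (e + c * L) = f (e + c * L + L) := h (e + c * L) (by nlinarith)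
    have e3 : e + (c + 1) * L = e + c * L + L := by ring
    rw [e3, ← h2, ← h1]

theorem chain_block (s : List Char) (L i c : Nat) (hL : 1 ≤ L) (hc : 1 ≤ c)
    (h : c * L ≤ pvT s L i) :
    i + (c + 1) * L ≤ s.length ∧
      (s.drop (i + c * L)).take L = (s.drop i).take L := by
  rcases (pvT_ge_iff s L (c * L) i).mp h with h0 | ⟨hbd, hmt⟩
  · exfalso; nlinarith
  have hbd' : i + (c + 1) * L ≤ s.length := by nlinarith [hbd]
  refine ⟨hbd', ?_⟩
  rw [window_eq_iff s (i + c * L) i L (by nlinarith) (by nlinarith)]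
  intro e he
  have := chain_fun (fun d => s.getD (i + d) default) L c
    (fun d hd => by
      have := hmt d hd
      simpa [Nat.add_assoc] using this) e he
  simp only at this
  have e1 : i + (e + c * L) = i + c * L + e := by omega
  rw [e1] at this
  exact this.symm

theorem chain_extend (s : List Char) (L i c : Nat) (hL : 1 ≤ L) (hc : 2 ≤ c)
    (h : (c - 1) * L ≤ pvT s L i) (hb : i + (c + 1) * L ≤ s.length)
    (he : (s.drop (i + c * L)).take L = (s.drop i).take L) :
    c * L ≤ pvT s L i := by
  have hprev := chain_block s L i (c - 1) hL (by omega) h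
  have hbm : i + c * L + L ≤ s.length := by
    have : (c + 1) * L = c * L + L := by ring
    omega
  have hnew := (window_eq_iff s (i + c * L) i L hbm (by nlinarith)).mp he
  have hold := (window_eq_iff s (i + (c - 1) * L) i L (by
      have : (c - 1 + 1) * L = (c - 1) * L + L := by ring
      have h2 : c - 1 + 1 = c := by omega
      nlinarith [hprev.1]) (by nlinarith)).mp hprev.2
  apply (pvT_ge_iff s L (c * L) i).mpr
  refine Or.inr ⟨by omega, ?_⟩
  intro d hd
  by_cases hsmall : d < (c - 1) * L
  · rcases (pvT_ge_iff s L ((c - 1) * L) i).mp h with h0 | ⟨_, hmt⟩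
    · omega
    · exact hmt d hsmall
  · -- d = (c-1)*L + e with e < L
    have hcL : (c - 1) * L + L = c * L := by
      have h2 : c - 1 + 1 = c := by omega
      calc (c - 1) * L + L = (c - 1 + 1) * L := by ring
        _ = c * L := by rw [h2]
    set e := d - (c - 1) * L with hedef
    have heL : e < L := by omega
    have hd1 : d = (c - 1) * L + e := by omega
    have a1 := hold e heL   -- getD (i + (c-1)L + e) = getD (i + e)
    have a2 := hnew e heL   -- getD (i + cL + e) = getD (i + e)
    have e1 : i + d = i + (c - 1) * L + e := by omega
    have e2 : i + (c - 1) * L + e + L = i + c * L + e := by omega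
    rw [e1, e2, a1, a2]

theorem slice2_eq (s : List Char) (i L : Nat) :
    PySem.List.slice s (some ((i : Int) + (L : Int))) (some ((i : Int) + 2 * (L : Int))) =
      (s.drop (i + L)).take L := by
  rw [show ((i : Int) + (L : Int)) = ((i + L : Nat) : Int) by push_cast; ring]
  rw [show ((i : Int) + 2 * (L : Int)) = ((i + L : Nat) : Int) + ((L : Nat) : Int) by push_cast; ring]
  exact PySem.List.slice_natCast_add s (i + L) L

theorem guard_iff (s : List Char) (L i : Nat) (hL : 1 ≤ L) :
    (i + 2 * L ≤ s.length ∧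
      PySem.List.slice s (some (i : Int)) (some ((i : Int) + (L : Int))) =
        PySem.List.slice s (some ((i : Int) + (L : Int))) (some ((i : Int) + 2 * (L : Int))))
    ↔ L ≤ pvT s L i := by
  rw [PySem.List.slice_natCast_add, slice2_eq]
  rw [pvT_ge_iff s L L i]
  constructor
  · rintro ⟨hbd, hW⟩
    refine Or.inr ⟨by omega, ?_⟩
    intro d hd
    have := (window_eq_iff s i (i + L) L (by omega) (by omega)).mp hW d hd
    have e1 : i + L + d = i + d + L := by omega
    rw [e1] at this
    exact this
  · rintro (h0 | ⟨hbd, hmt⟩)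
    · omega
    refine ⟨by omega, ?_⟩
    rw [window_eq_iff s i (i + L) L (by omega) (by omega)]
    intro d hd
    have := hmt d hd
    have e1 : i + d + L = i + L + d := by omega
    rw [e1] at this
    exact this

theorem cnt_spec (s : List Char) (L i : Nat) (hL : 1 ≤ L) :
    ∀ (k c fuel : Nat), 2 ≤ c → c + k = pvT s L i / L + 1 → k ≤ fuel →
      pvCntA s L ((s.drop i).take L) fuel c (i + c * L) =
        (pvT s L i / L + 1, i + (pvT s L i / L + 1) * L) := by
  intro k
  induction k with
  | zero =>
    intro c fuel hc hck _
    have hcm : c = pvT s L i / L + 1 := by omega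
    cases fuel with
    | zero => rw [hcm]; rfl
    | succ f =>
      rw [pvCntA]
      rw [if_neg, hcm]
      rw [PySem.List.slice_natCast_add]
      rintro ⟨hb', he'⟩
      have hext := chain_extend s L i c hL hc
        (by
          have h1 : (c - 1) = pvT s L i / L := by omega
          rw [h1]
          exact Nat.div_mul_le_self _ _)
        (by nlinarith [hb'])
        he'
      have : c ≤ pvT s L i / L := (Nat.le_div_iff_mul_le (by omega)).mpr hext
      omega
  | succ k ih =>
    intro c fuel hc hck hkf
    cases fuel with
    | zero => omega
    | succ f =>
      have hcm : c ≤ pvT s L i / L := by omega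
      have hcL : c * L ≤ pvT s L i := by
        calc c * L ≤ (pvT s L i / L) * L := by
              exact Nat.mul_le_mul_right L hcm
          _ ≤ pvT s L i := Nat.div_mul_le_self _ _
      have hblk := chain_block s L i c hL (by omega) hcL
      rw [pvCntA, PySem.List.slice_natCast_add]
      rw [if_pos ⟨by nlinarith [hblk.1], hblk.2⟩]
      have e1 : i + c * L + L = i + (c + 1) * L := by ring
      rw [e1]
      exact ih (c + 1) f (by omega) (by omega) (by omega)

theorem fr_eq (s : List Char) (L : Nat) (hL : 1 ≤ L) :
    ∀ (fuel i : Nat) (acc : List (List Char)),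
      pvFrA s L fuel i acc = pvFrB s L fuel i acc := by
  intro fuel
  induction fuel with
  | zero => intro i acc; rfl
  | succ f ih =>
    intro i acc
    rw [pvFrA, pvFrB]
    by_cases hi : i < s.length
    · rw [if_pos hi, if_pos hi]
      by_cases hg : L ≤ pvT s L i
      · rw [if_pos ((guard_iff s L i hL).mpr hg), if_pos hg]
        have hm1 : 1 ≤ pvT s L i / L := (Nat.one_le_div_iff (by omega)).mpr hg
        have hr : pvCntA s L (PySem.List.slice s (some (i : Int)) (some ((i : Int) + (L : Int))))
              (s.length + 1) 2 (i + 2 * L)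
            = (pvT s L i / L + 1, i + (pvT s L i / L + 1) * L) := by
          rw [PySem.List.slice_natCast_add]
          exact cnt_spec s L i hL (pvT s L i / L - 1) 2 (s.length + 1) (by omega) (by omega)
            (by
              have h1 := pvT_le s L i
              have h2 := Nat.div_le_self (pvT s L i) L
              omega)
        dsimp only
        rw [hr]
        exact ih _ _
      · rw [if_neg (fun hA => hg ((guard_iff s L i hL).mp hA)), if_neg hg]
        exact ih _ _
    · rw [if_neg hi, if_neg hi]

theorem outer_eq (so : Bool) : ∀ (fuel : Nat) (ns : List Char) (length max_len : Nat),
    1 ≤ length → pvOuterA so fuel ns length max_len = pvOuterB so fuel ns length max_len := by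
  intro fuel
  induction fuel with
  | zero => intro ns length max_len _; rfl
  | succ f ih =>
    intro ns length max_len hl
    rw [pvOuterA, pvOuterB]
    by_cases hc : length ≤ max_len
    · rw [if_pos hc, if_pos hc]
      dsimp only
      rw [fr_eq ns length hl]
      exact ih _ _ _ (by omega)
    · rw [if_neg hc, if_neg hc]

theorem go_filter (c : Char) : ∀ (l : List Char) (fuel : Nat) (acc : List Char),
    l.length ≤ fuel →
    PySem.Chars.replace.go [c] [] fuel l acc = acc.reverse ++ l.filter (fun x => !(x == c)) := by
  intro l
  induction l with
  | nil =>
    intro fuel acc _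
    cases fuel <;> simp [PySem.Chars.replace.go]
  | cons x t ih =>
    intro fuel acc hlen
    cases fuel with
    | zero => simp at hlen
    | succ f =>
      rw [PySem.Chars.replace.go]
      by_cases hx : x = c
      · subst hx
        simp only [List.isPrefixOf, BEq.rfl, Bool.and_true, if_pos]
        simp only [List.length_cons, List.length_nil, List.drop_succ_cons, List.drop_zero,
          List.reverse_nil, List.nil_append]
        rw [ih f acc (by simpa using hlen)]
        simp
      · have hpre : ([c].isPrefixOf (x :: t)) = false := by
          simp [List.isPrefixOf]
          exact fun h => absurd h.symm hx
        rw [hpre]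
        simp only [Bool.false_eq_true, if_false]
        rw [ih f (x :: acc) (by simpa using hlen)]
        simp [hx]

theorem replace_single_nil (c : Char) (cs : List Char) :
    PySem.Chars.replace cs [c] [] = cs.filter (fun x => !(x == c)) := by
  rw [PySem.Chars.replace]
  simp only [List.isEmpty_cons, Bool.false_eq_true, if_false]
  simpa using go_filter c cs cs.length [] (le_refl _)

theorem stripped_len (code : List Char) :
    (PySem.Chars.replace (PySem.Chars.replace code ['['] []) [']'] []).length =
      List.countP (fun c => !(c == '[') && !(c == ']')) code := by
  rw [replace_single_nil, replace_single_nil, List.filter_filter]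
  rw [← List.countP_eq_length_filter]
  apply List.countP_congr
  intro a _
  simp [Bool.and_comm]

-- ===== VERDICT (by name: the statement is the Claim_ definition above) =====
theorem repeat_chunking_spec : Claim_equal_repeat_chunking := by
  intro seq single_only _
  unfold Spec_repeat_chunking repeat_chunking repeat_chunking_alt
  dsimp only
  rw [outer_eq single_only _ _ _ _ (by omega), stripped_len]
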